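-- pv_equiv track=rewrite | github.com/BlueBrain/covid-19-find | api/covid19find/simulation/optlib.py | packseverities
-- ===== SOURCE A (Python) =====
-- def packseverities(sev,trig):
--    n = len(sev)
--    newsev = [sev[0]]
--    newtrig = [trig[0]]
--    j = 0
--    for i in range(1,n):
--       if sev[i] == newsev[j]:
--          continue
--       else:
--          newsev.append(sev[i])
--          newtrig.append(trig[i])
--          j = j + 1
--    return newsev,newtrig
-- ===== SOURCE B (Python) =====
-- def packseverities(sev, trig):
--     firsts = [0] + [i for i in range(1, len(sev)) if sev[i] != sev[i - 1]]
--     newsev = [sev[i] for i in firsts]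
--     newtrig = [trig[i] for i in firsts]
--     return newsev, newtrig
-- ===== Notes on version B (the rewrite author's own statement) =====
-- stated objective: alternative
-- what changed: Replaces the fused append-on-difference loop (state: two growing lists plus a last-index counter) by first computing the list of run-start indices and then gathering sev and trig at those indices in two separate passes.
import Mathlib
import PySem

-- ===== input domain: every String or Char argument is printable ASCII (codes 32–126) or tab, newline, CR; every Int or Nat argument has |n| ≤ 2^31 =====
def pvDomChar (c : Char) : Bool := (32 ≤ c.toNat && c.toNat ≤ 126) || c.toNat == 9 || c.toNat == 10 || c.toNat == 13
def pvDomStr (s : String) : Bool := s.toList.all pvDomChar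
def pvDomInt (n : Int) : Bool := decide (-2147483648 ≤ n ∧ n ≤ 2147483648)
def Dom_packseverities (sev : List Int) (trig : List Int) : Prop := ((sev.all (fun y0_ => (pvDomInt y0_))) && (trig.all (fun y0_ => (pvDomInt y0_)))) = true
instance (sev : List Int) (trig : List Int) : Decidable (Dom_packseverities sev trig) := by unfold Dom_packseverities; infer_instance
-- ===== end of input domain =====

-- B collapses consecutive duplicates by first computing the run-start index list, then
-- gathering sev and trig at those indices in two separate passes (alternative decomposition).

-- ===== PORT A =====
-- A's loop body: compare sev[i] against newsev[j]; on difference append sev[i], trig[i], bump j.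
def packAStep (sev : List Int) (trig : List Int)
    (st : List Int × List Int × Int) (i : Int) : List Int × List Int × Int :=
  if PySem.List.pyGetD sev i 0 = PySem.List.pyGetD st.1 st.2.2 0 then st
  else (st.1 ++ [PySem.List.pyGetD sev i 0], st.2.1 ++ [PySem.List.pyGetD trig i 0], st.2.2 + 1)

-- A's loop: state (newsev, newtrig, j) over i in range(1, n).
def packALoop (sev : List Int) (trig : List Int) : List Int × List Int × Int :=
  (PySem.List.pyRange 1 (sev.length : Int) 1).foldl (packAStep sev trig)
    ([PySem.List.pyGetD sev 0 0], [PySem.List.pyGetD trig 0 0], (0 : Int))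

def packseverities (sev : List Int) (trig : List Int) : List Int × List Int :=
  ((packALoop sev trig).1, (packALoop sev trig).2.1)

-- ===== PORT B =====
-- B's firsts: the run-start indices [0] + [i for i in range(1, len(sev)) if sev[i] != sev[i-1]].
def packBFirsts (sev : List Int) : List Int :=
  0 :: (PySem.List.pyRange 1 (sev.length : Int) 1).filter
    (fun i => decide (PySem.List.pyGetD sev i 0 ≠ PySem.List.pyGetD sev (i - 1) 0))

def packseverities_alt (sev : List Int) (trig : List Int) : List Int × List Int :=
  ((packBFirsts sev).map (fun i => PySem.List.pyGetD sev i 0),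
   (packBFirsts sev).map (fun i => PySem.List.pyGetD trig i 0))

-- ===== PRECONDITION & SPEC =====
-- Exactly where the Python A returns: it raises IndexError on empty sev/trig and whenever
-- a run-boundary index i (sev[i] != sev[i-1]) is out of range for trig.
def Pre_packseverities (sev : List Int) (trig : List Int) : Prop :=
  sev ≠ [] ∧ trig ≠ [] ∧
    ∀ i ∈ PySem.List.pyRange 1 (sev.length : Int) 1,
      PySem.List.pyGetD sev i 0 ≠ PySem.List.pyGetD sev (i - 1) 0 → i < (trig.length : Int)

instance (sev : List Int) (trig : List Int) : Decidable (Pre_packseverities sev trig) := by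
  unfold Pre_packseverities; infer_instance

def pvWitness_packseverities : List Int × List Int := ([1, 1, 2, 2, 3], [10, 20, 30, 40, 50])

def Spec_packseverities (sev : List Int) (trig : List Int) (out : List Int × List Int) : Prop :=
  out = packseverities_alt sev trig
instance (sev : List Int) (trig : List Int) (out : List Int × List Int) :
    Decidable (Spec_packseverities sev trig out) := by unfold Spec_packseverities; infer_instance

-- ===== CLAIM (what is proved, stated in full; the proofs are below) =====
def Claim_equal_packseverities : Prop := ∀ (sev : List Int) (trig : List Int),
  Dom_packseverities sev trig → Pre_packseverities sev trig →
    Spec_packseverities sev trig (packseverities sev trig)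

-- ===== LEMMAS AND PROOFS =====

-- the run-start indices restricted to positions 1..k
def packFirsts (sev : List Int) (k : Int) : List Int :=
  0 :: (PySem.List.pyRange 1 (1 + k) 1).filter
      (fun i => decide (PySem.List.pyGetD sev i 0 ≠ PySem.List.pyGetD sev (i - 1) 0))

lemma pyGetD_last (xs : List Int) (m : Int) (h : xs ≠ []) (hm : m = (xs.length : Int) - 1) :
    PySem.List.pyGetD xs m 0 = xs.getLast h := by
  have hl : 0 < xs.length := List.length_pos_iff.mpr h
  subst hm
  rw [PySem.List.pyGetD_eq_getElem xs 0 (by omega) (by omega)]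
  have ht : (((xs.length : Int)) - 1).toNat = xs.length - 1 := by omega
  simp [ht, List.getLast_eq_getElem]

lemma pyRange_split (k : Nat) : PySem.List.pyRange 1 (1 + ((k : Int) + 1)) 1
    = PySem.List.pyRange 1 (1 + (k : Int)) 1 ++ [1 + (k : Int)] := by
  have := PySem.List.pyRange_one_succ_right (a := 1) (b := 1 + (k : Int)) (by omega)
  simpa [add_comm, add_left_comm, add_assoc] using this

lemma packFirsts_succ (sev : List Int) (k : Nat) :
    packFirsts sev ((k : Int) + 1)
      = packFirsts sev (k : Int)
        ++ (if PySem.List.pyGetD sev (1 + (k : Int)) 0 = PySem.List.pyGetD sev (k : Int) 0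
            then [] else [1 + (k : Int)]) := by
  have hidx : (1 + (k : Int)) - 1 = (k : Int) := by ring
  unfold packFirsts
  rw [pyRange_split, List.filter_append]
  by_cases hEq : PySem.List.pyGetD sev (1 + (k : Int)) 0 = PySem.List.pyGetD sev (k : Int) 0
  · simp only [List.filter_cons, List.filter_nil, hidx, hEq, ne_eq, not_true_eq_false,
      decide_false, Bool.false_eq_true, if_false, if_true, List.append_nil]
  · simp only [List.filter_cons, List.filter_nil, hidx, hEq, ne_eq, not_false_eq_true,
      decide_true, if_true, if_false, List.cons_append]

-- Loop invariant: after processing indices 1..k, A's state is B's two gathers over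
-- packFirsts sev k together with its last index, and the last collected severity is sev[k].
lemma packA_invariant (sev trig : List Int) (k : Nat) :
    (PySem.List.pyRange 1 (1 + (k : Int)) 1).foldl (packAStep sev trig)
        ([PySem.List.pyGetD sev 0 0], [PySem.List.pyGetD trig 0 0], (0 : Int))
      = ((packFirsts sev k).map (fun i => PySem.List.pyGetD sev i 0),
         (packFirsts sev k).map (fun i => PySem.List.pyGetD trig i 0),
         ((packFirsts sev k).length : Int) - 1)
    ∧ ((packFirsts sev k).map (fun i => PySem.List.pyGetD sev i 0)).getLast?
        = some (PySem.List.pyGetD sev (k : Int) 0) := by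
  induction k with
  | zero =>
      constructor
      · simp [packFirsts, PySem.List.pyRange_one_eq_nil]
      · simp [packFirsts, PySem.List.pyRange_one_eq_nil]
  | succ k ih =>
      obtain ⟨ihst, ihlast⟩ := ih
      have hne : (packFirsts sev (k : Int)).map (fun i => PySem.List.pyGetD sev i 0) ≠ [] := by
        simp [packFirsts]
      have hlastv : ((packFirsts sev (k : Int)).map (fun i => PySem.List.pyGetD sev i 0)).getLast hne
          = PySem.List.pyGetD sev (k : Int) 0 := by
        have := ihlast
        rw [List.getLast?_eq_some_getLast hne] at this
        exact Option.some.inj this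
      have hlastD : PySem.List.pyGetD
          ((packFirsts sev (k : Int)).map (fun i => PySem.List.pyGetD sev i 0))
          (((packFirsts sev (k : Int)).length : Int) - 1) 0
          = PySem.List.pyGetD sev (k : Int) 0 := by
        rw [pyGetD_last _ _ hne (by simp)]
        exact hlastv
      push_cast
      rw [pyRange_split, List.foldl_append, ihst, packFirsts_succ sev k,
        List.foldl_cons, List.foldl_nil]
      rw [show ((k : Int) + 1) = 1 + (k : Int) from by ring]
      simp only [packAStep, hlastD]
      by_cases hEq : PySem.List.pyGetD sev (1 + (k : Int)) 0 = PySem.List.pyGetD sev (k : Int) 0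
      · rw [if_pos hEq, if_pos hEq]
        refine ⟨by simp, ?_⟩
        rw [List.append_nil, hEq]
        exact ihlast
      · rw [if_neg hEq, if_neg hEq]
        constructor
        · simp
        · simp

theorem packseverities_spec : Claim_equal_packseverities := by
  intro sev trig _hdom hpre
  unfold Spec_packseverities packseverities packseverities_alt packALoop
  obtain ⟨hsev, -, -⟩ := hpre
  have hlen : 0 < sev.length := List.length_pos_iff.mpr hsev
  have hk : (sev.length : Int) = 1 + ((sev.length - 1 : Nat) : Int) := by
    omega
  have hinv := (packA_invariant sev trig (sev.length - 1)).1
  rw [hk, hinv]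
  have hF : packFirsts sev ((sev.length - 1 : Nat) : Int) = packBFirsts sev := by
    unfold packFirsts packBFirsts
    rw [← hk]
  rw [hF]
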